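-- pv_equiv track=rewrite | github.com/Jandel7/Biological-Sequence-Alignments | Global Alignment-Needleman-Wunsch.py | initializeBackTrackingMatrix
-- ===== SOURCE A (Python) =====
-- def initializeBackTrackingMatrix(s1Size,s2Size):
--
-- 	backTrackingMatrix = []
--
-- 	for i in range(len(s1Size) + 1):
--
-- 		helperMatrix = []
--
-- 		for j in range(len(s2Size) + 1):
--
-- 			helperMatrix.append('0')
--
-- 		backTrackingMatrix.append(helperMatrix)
--
--
-- 	#fill the first column and row of the matrix
-- 	for j in range(1,len(s2Size) + 1):
--
-- 		backTrackingMatrix[0][j] = "left"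
--
-- 	for i in range(1,len(s1Size)+1):
--
-- 		backTrackingMatrix[i][0] = "upper"
--
-- 	backTrackingMatrix[0][0] = "first cell"
--
-- 	return backTrackingMatrix
-- ===== SOURCE B (Python) =====
-- def initializeBackTrackingMatrix(s1Size, s2Size):
--     # Flat construction: compute every cell from its linear index k via divmod,
--     # then chunk the flat list into rows of width len(s2Size)+1.
--     w = len(s2Size) + 1
--     def cell(k):
--         i, j = divmod(k, w)
--         if i == 0:
--             return 'first cell' if j == 0 else 'left'
--         return 'upper' if j == 0 else '0'
--     flat = [cell(k) for k in range((len(s1Size) + 1) * w)]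
--     return [flat[r * w:(r + 1) * w] for r in range(len(s1Size) + 1)]
-- ===== Notes on version B (the rewrite author's own statement) =====
-- stated objective: alternative
-- what changed: B computes each cell's value from its flat linear index via divmod(k, width) into one flat list and then chunks that list into rows by slicing, replacing A's three staged passes (zero-fill, top-row overwrite, left-column overwrite) over a nested list.
import Mathlib
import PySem

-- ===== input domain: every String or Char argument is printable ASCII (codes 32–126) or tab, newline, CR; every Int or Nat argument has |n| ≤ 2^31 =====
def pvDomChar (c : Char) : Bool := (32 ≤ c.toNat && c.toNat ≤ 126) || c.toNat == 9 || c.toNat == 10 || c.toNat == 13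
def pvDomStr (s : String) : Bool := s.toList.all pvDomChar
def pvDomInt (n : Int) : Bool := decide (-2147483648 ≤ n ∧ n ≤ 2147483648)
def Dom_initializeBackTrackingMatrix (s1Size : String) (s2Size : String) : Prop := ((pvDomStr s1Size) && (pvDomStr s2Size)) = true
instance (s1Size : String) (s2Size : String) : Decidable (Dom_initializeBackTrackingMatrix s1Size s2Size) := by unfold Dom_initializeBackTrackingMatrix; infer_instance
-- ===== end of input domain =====

-- B computes every cell from its flat linear index by divmod and chunks the flat list
-- into rows, instead of A's zero-fill followed by two border-overwrite loops (objective: alternative).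

-- ===== PORT A =====
-- literal transliteration of A: zero-fill by nested append loops, then overwrite
-- row 0 with "left", column 0 with "upper", and cell (0,0) with "first cell"
def initializeBackTrackingMatrix (s1Size : String) (s2Size : String) : List (List String) :=
  let backTrackingMatrix : List (List String) :=
    (PySem.List.pyRange 0 (PySem.Str.len s1Size + 1) 1).foldl
      (fun back _i =>
        back ++ [(PySem.List.pyRange 0 (PySem.Str.len s2Size + 1) 1).foldl
          (fun helper _j => helper ++ ["0"]) []]) []
  let m2 :=
    (PySem.List.pyRange 1 (PySem.Str.len s2Size + 1) 1).foldl
      (fun back j => PySem.List.pySetD back 0 (PySem.List.pySetD (PySem.List.pyGetD back 0 []) j "left"))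
      backTrackingMatrix
  let m3 :=
    (PySem.List.pyRange 1 (PySem.Str.len s1Size + 1) 1).foldl
      (fun back i => PySem.List.pySetD back i (PySem.List.pySetD (PySem.List.pyGetD back i []) 0 "upper"))
      m2
  PySem.List.pySetD m3 0 (PySem.List.pySetD (PySem.List.pyGetD m3 0 []) 0 "first cell")

-- ===== PORT B =====
-- transliteration of Source B: cell value from linear index k via divmod by the row width,
-- flat list over range((m+1)*w), then rows cut out of it by slicing
def btmCell (w : Int) (k : Int) : String :=
  let i := PySem.Int.floordiv k w
  let j := PySem.Int.mod k w
  if i = 0 then (if j = 0 then "first cell" else "left")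
  else (if j = 0 then "upper" else "0")

def initializeBackTrackingMatrix_alt (s1Size : String) (s2Size : String) : List (List String) :=
  let w := PySem.Str.len s2Size + 1
  let flat := (PySem.List.pyRange 0 ((PySem.Str.len s1Size + 1) * w) 1).map (btmCell w)
  (PySem.List.pyRange 0 (PySem.Str.len s1Size + 1) 1).map
    (fun r => PySem.List.slice flat (some (r * w)) (some ((r + 1) * w)))

-- ===== PRECONDITION & SPEC =====
def Spec_initializeBackTrackingMatrix (s1Size : String) (s2Size : String) (out : List (List String)) : Prop := out = initializeBackTrackingMatrix_alt s1Size s2Size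
instance (s1Size : String) (s2Size : String) (out : List (List String)) : Decidable (Spec_initializeBackTrackingMatrix s1Size s2Size out) := by unfold Spec_initializeBackTrackingMatrix; infer_instance

-- ===== CLAIM (what is proved, stated in full; the proofs are below) =====
def Claim_equal_initializeBackTrackingMatrix : Prop := ∀ (s1Size : String) (s2Size : String), Dom_initializeBackTrackingMatrix s1Size s2Size → Spec_initializeBackTrackingMatrix s1Size s2Size (initializeBackTrackingMatrix s1Size s2Size)

-- ===== LEMMAS AND PROOFS =====

-- the canonical matrix both programs produce, for s1 of length m and s2 of length n
def pvCanon (m n : Nat) : List (List String) :=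
  ("first cell" :: List.replicate n "left") :: List.replicate m ("upper" :: List.replicate n "0")

-- ---- A-side lemmas ----

-- the zero-fill loop appends k copies of x
theorem pvFoldAppendConst {α : Type} (x : α) (k : Nat) (init : List α) :
      (PySem.List.pyRange 0 ((k : Nat) : Int) 1).foldl (fun h _ => h ++ [x]) init = init ++ List.replicate k x := by
  induction k generalizing init with
  | zero => simp [PySem.List.pyRange_one_eq_nil]
  | succ k ih =>
      have h : PySem.List.pyRange 0 ((k + 1 : Nat) : Int) 1
          = PySem.List.pyRange 0 (k : Int) 1 ++ [(k : Int)] := by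
        push_cast
        exact PySem.List.pyRange_one_succ_right (by omega)
      rw [h, List.foldl_append, ih]
      simp [List.replicate_succ']

-- the "left" overwrite loop turns the k cells after the head of row 0 into "left"
theorem pvLeftLoop (h : String) (k : Nat) :
    ∀ (t : List String) (rows : List (List String)),
      (PySem.List.pyRange 1 ((k : Int) + 1) 1).foldl
        (fun back j => PySem.List.pySetD back 0 (PySem.List.pySetD (PySem.List.pyGetD back 0 []) j "left"))
        ((h :: (List.replicate k "0" ++ t)) :: rows)
      = (h :: (List.replicate k "left" ++ t)) :: rows := by
  induction k with
  | zero => intro t rows; simp [PySem.List.pyRange_one_eq_nil]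
  | succ k ih =>
      intro t rows
      have hsplit : PySem.List.pyRange 1 (((k + 1 : Nat) : Int) + 1) 1
          = PySem.List.pyRange 1 ((k : Int) + 1) 1 ++ [(k : Int) + 1] := by
        push_cast
        exact PySem.List.pyRange_one_succ_right (by omega)
      have hrow : (h :: (List.replicate (k + 1) "0" ++ t)) = (h :: (List.replicate k "0" ++ ("0" :: t))) := by
        simp [List.replicate_succ']
      have hk1 : ((k : Int) + 1) = (((k + 1 : Nat) : Int)) := by push_cast; ring
      rw [hsplit, List.foldl_append, hrow, ih, List.foldl_cons, List.foldl_nil, hk1,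
        PySem.List.pySetD_natCast]
      simp [PySem.List.pyGetD, PySem.List.pyIdx?, PySem.List.pySetD, PySem.List.pySet?,
        List.set_cons_succ, List.replicate_succ']

-- the "upper" overwrite loop maps the k rows below row 0 to w (= z with its head set to "upper")
theorem pvUpperLoop (z w : List String) (hzw : PySem.List.pySetD z 0 "upper" = w) (k : Nat) :
    ∀ (r0 : List String) (t : List (List String)),
      (PySem.List.pyRange 1 ((k : Int) + 1) 1).foldl
        (fun back i => PySem.List.pySetD back i (PySem.List.pySetD (PySem.List.pyGetD back i []) 0 "upper"))
        (r0 :: (List.replicate k z ++ t))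
      = r0 :: (List.replicate k w ++ t) := by
  induction k with
  | zero => intro r0 t; simp [PySem.List.pyRange_one_eq_nil]
  | succ k ih =>
      intro r0 t
      have hsplit : PySem.List.pyRange 1 (((k + 1 : Nat) : Int) + 1) 1
          = PySem.List.pyRange 1 ((k : Int) + 1) 1 ++ [(k : Int) + 1] := by
        push_cast
        exact PySem.List.pyRange_one_succ_right (by omega)
      have hrow : (r0 :: (List.replicate (k + 1) z ++ t)) = (r0 :: (List.replicate k z ++ (z :: t))) := by
        simp [List.replicate_succ']
      have hk1 : ((k : Int) + 1) = (((k + 1 : Nat) : Int)) := by push_cast; ring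
      rw [hsplit, List.foldl_append, hrow, ih, List.foldl_cons, List.foldl_nil, hk1,
        PySem.List.pyGetD_natCast, PySem.List.pySetD_natCast]
      simp [hzw, List.set_cons_succ, List.replicate_succ']

theorem pvA_eq_canon (s1 s2 : String) :
    initializeBackTrackingMatrix s1 s2 = pvCanon s1.length s2.length := by
  unfold initializeBackTrackingMatrix pvCanon
  have e1 : PySem.Str.len s1 + 1 = ((s1.length + 1 : Nat) : Int) := by
    simp [PySem.Str.len_eq]
  have e2 : PySem.Str.len s2 + 1 = ((s2.length + 1 : Nat) : Int) := by
    simp [PySem.Str.len_eq]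
  simp only [e1, e2, pvFoldAppendConst, List.nil_append]
  have c1 : ((s1.length + 1 : Nat) : Int) = ((s1.length : Nat) : Int) + 1 := by push_cast; ring
  have c2 : ((s2.length + 1 : Nat) : Int) = ((s2.length : Nat) : Int) + 1 := by push_cast; ring
  simp only [c1, c2]
  have hr0 : List.replicate (s1.length + 1) (List.replicate (s2.length + 1) "0")
      = ("0" :: (List.replicate s2.length "0" ++ ([] : List String)))
        :: List.replicate s1.length (List.replicate (s2.length + 1) "0") := by
    simp [List.replicate_succ]
  rw [hr0, pvLeftLoop]
  have hrep : ("0" :: (List.replicate s2.length "left" ++ ([] : List String)))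
        :: List.replicate s1.length (List.replicate (s2.length + 1) "0")
      = ("0" :: (List.replicate s2.length "left" ++ []))
        :: (List.replicate s1.length (List.replicate (s2.length + 1) "0") ++ []) := by
    simp
  rw [hrep, pvUpperLoop (List.replicate (s2.length + 1) "0") ("upper" :: List.replicate s2.length "0")
    (by simp [PySem.List.pySetD, PySem.List.pySet?, PySem.List.pyIdx?, List.replicate_succ])]
  simp [PySem.List.pySetD, PySem.List.pySet?, PySem.List.pyGetD, PySem.List.pyIdx?]

-- ---- B-side lemmas ----

-- a cell in the top row (k < n+1)
theorem pvCell_top (n k : Nat) (hk : k < n + 1) :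
    btmCell ((n + 1 : Nat) : Int) ((k : Nat) : Int)
      = (if k = 0 then "first cell" else "left") := by
  unfold btmCell
  rw [PySem.Int.floordiv_natCast, PySem.Int.mod_natCast]
  have h1 : k / (n + 1) = 0 := Nat.div_eq_of_lt hk
  have h2 : k % (n + 1) = k := Nat.mod_eq_of_lt hk
  simp [h1, h2]

-- a cell in a lower row (index (i+1)*(n+1) + k with k < n+1)
theorem pvCell_body (n i k : Nat) (hk : k < n + 1) :
    btmCell ((n + 1 : Nat) : Int) (((i + 1) * (n + 1) + k : Nat) : Int)
      = (if k = 0 then "upper" else "0") := by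
  unfold btmCell
  rw [PySem.Int.floordiv_natCast, PySem.Int.mod_natCast]
  have h1 : ((i + 1) * (n + 1) + k) / (n + 1) = i + 1 := by
    rw [Nat.add_comm, Nat.mul_comm, Nat.add_mul_div_left _ _ (by omega : 0 < n + 1),
      Nat.div_eq_of_lt hk]
    omega
  have h2 : ((i + 1) * (n + 1) + k) % (n + 1) = k := by
    rw [Nat.add_comm, Nat.mul_comm, Nat.add_mul_mod_self_left, Nat.mod_eq_of_lt hk]
  simp [h1, h2]
  intro h
  exact absurd h (by omega)

-- a block of n+1 consecutive cells, as a map over List.range (n+1)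
theorem pvBlock (n : Nat) (a b : String) :
    (List.range (n + 1)).map (fun k => if k = 0 then a else b) = a :: List.replicate n b := by
  rw [List.range_succ_eq_map, List.map_cons, List.map_map]
  simp [Function.comp_def]

-- the flat list is the flattening of the canonical matrix
theorem pvFlat_eq (n : Nat) : ∀ m : Nat,
    (List.range ((m + 1) * (n + 1))).map (fun k => btmCell ((n + 1 : Nat) : Int) ((k : Nat) : Int))
      = (pvCanon m n).flatten := by
  intro m
  induction m with
  | zero =>
      rw [show (0 + 1) * (n + 1) = n + 1 from by ring]
      rw [show (List.range (n + 1)).map (fun k => btmCell ((n + 1 : Nat) : Int) ((k : Nat) : Int))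
            = (List.range (n + 1)).map (fun k => if k = 0 then "first cell" else "left") from
          List.map_congr_left (fun k hk => pvCell_top n k (List.mem_range.mp hk)),
        pvBlock]
      simp [pvCanon]
  | succ m ih =>
      have hsplit : (m + 2) * (n + 1) = (m + 1) * (n + 1) + (n + 1) := by ring
      rw [hsplit, List.range_add, List.map_append, List.map_map, ih]
      have hblock : (List.range (n + 1)).map
            ((fun k => btmCell ((n + 1 : Nat) : Int) ((k : Nat) : Int)) ∘ (fun k => (m + 1) * (n + 1) + k))
          = "upper" :: List.replicate n "0" := by
        rw [show (List.range (n + 1)).map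
              ((fun k => btmCell ((n + 1 : Nat) : Int) ((k : Nat) : Int)) ∘ (fun k => (m + 1) * (n + 1) + k))
            = (List.range (n + 1)).map (fun k => if k = 0 then "upper" else "0") from
            List.map_congr_left (fun k hk => pvCell_body n m k (List.mem_range.mp hk)),
          pvBlock]
      rw [hblock]
      simp [pvCanon, List.replicate_succ']

-- cutting row r out of the flattening of a list of rows of uniform width w
theorem pvChunk (w : Nat) : ∀ (L : List (List String)), (∀ row ∈ L, row.length = w) →
    (List.range L.length).map (fun r => (L.flatten.drop (r * w)).take w) = L := by
  intro L
  induction L with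
  | nil => intro _; simp
  | cons x L ih =>
      intro hlen
      have hx : x.length = w := hlen x (List.mem_cons_self)
      have hhead : List.take w (List.drop (0 * w) (x :: L).flatten) = x := by
        simp only [Nat.zero_mul, List.drop_zero, List.flatten_cons, ← hx, List.take_left]
      rw [List.length_cons, List.range_succ_eq_map, List.map_cons, List.map_map, hhead]
      congr 1
      rw [show ((fun r => (((x :: L).flatten.drop (r * w)).take w)) ∘ Nat.succ)
              = (fun r => ((L.flatten.drop (r * w)).take w)) from ?_]
      · exact ih (fun row hr => hlen row (List.mem_cons_of_mem _ hr))
      · funext r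
        simp only [Function.comp]
        have : Nat.succ r * w = x.length + r * w := by
          rw [hx, Nat.succ_mul]; exact Nat.add_comm _ _
        rw [List.flatten_cons, this, List.drop_append,
          List.drop_eq_nil_of_le (by omega : x.length ≤ x.length + r * w), List.nil_append, Nat.add_sub_cancel_left]

theorem pvB_eq_canon (s1 s2 : String) :
    initializeBackTrackingMatrix_alt s1 s2 = pvCanon s1.length s2.length := by
  unfold initializeBackTrackingMatrix_alt
  have e1 : PySem.Str.len s1 + 1 = ((s1.length + 1 : Nat) : Int) := by simp [PySem.Str.len_eq]
  have e2 : PySem.Str.len s2 + 1 = ((s2.length + 1 : Nat) : Int) := by simp [PySem.Str.len_eq]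
  simp only [e1, e2]
  set m := s1.length
  set n := s2.length
  have hmul : ((m + 1 : Nat) : Int) * ((n + 1 : Nat) : Int) = (((m + 1) * (n + 1) : Nat) : Int) := by
    push_cast; ring
  rw [hmul, PySem.List.pyRange_zero_nat, PySem.List.pyRange_zero_nat, List.map_map, List.map_map]
  have hflat : (List.range ((m + 1) * (n + 1))).map
        ((btmCell ((n + 1 : Nat) : Int)) ∘ (fun k : Nat => (k : Int)))
      = (pvCanon m n).flatten := by
    rw [show ((btmCell ((n + 1 : Nat) : Int)) ∘ (fun k : Nat => (k : Int)))
          = (fun k : Nat => btmCell ((n + 1 : Nat) : Int) ((k : Nat) : Int)) from rfl]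
    exact pvFlat_eq n m
  rw [hflat]
  have hrow : ∀ r : Nat,
      PySem.List.slice (pvCanon m n).flatten (some ((r : Int) * ((n + 1 : Nat) : Int)))
          (some (((r : Int) + 1) * ((n + 1 : Nat) : Int)))
        = (((pvCanon m n).flatten.drop (r * (n + 1))).take (n + 1)) := by
    intro r
    have ha : (r : Int) * ((n + 1 : Nat) : Int) = ((r * (n + 1) : Nat) : Int) := by push_cast; ring
    have hb : ((r : Int) + 1) * ((n + 1 : Nat) : Int) = (((r + 1) * (n + 1) : Nat) : Int) := by
      push_cast; ring
    rw [ha, hb, PySem.List.slice_natCast,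
      show (r + 1) * (n + 1) - r * (n + 1) = n + 1 from by rw [Nat.add_mul]; omega]
  have hlen : ∀ row ∈ pvCanon m n, row.length = n + 1 := by
    intro row hr
    unfold pvCanon at hr
    rcases List.mem_cons.mp hr with h | h
    · simp [h]
    · rw [List.eq_of_mem_replicate h]; simp
  have hcount : m + 1 = (pvCanon m n).length := by simp [pvCanon]
  calc (List.range (m + 1)).map
        ((fun r : Int => PySem.List.slice (pvCanon m n).flatten (some (r * ((n + 1 : Nat) : Int)))
            (some ((r + 1) * ((n + 1 : Nat) : Int)))) ∘ (fun k : Nat => (k : Int)))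
      = (List.range (m + 1)).map (fun r : Nat => (((pvCanon m n).flatten.drop (r * (n + 1))).take (n + 1))) := by
        exact List.map_congr_left (fun r _ => hrow r)
    _ = pvCanon m n := by rw [hcount]; exact pvChunk (n + 1) (pvCanon m n) hlen

-- ===== VERDICT (by name: the statement is the Claim_ definition above) =====
theorem initializeBackTrackingMatrix_spec : Claim_equal_initializeBackTrackingMatrix := by
  unfold Claim_equal_initializeBackTrackingMatrix
  intro s1 s2 _
  unfold Spec_initializeBackTrackingMatrix
  rw [pvA_eq_canon, pvB_eq_canon]
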